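-- pv_equiv track=rewrite | github.com/MrBrantCode/unitest_baseline | mut_generate/mist_train_taco/taco_13568/solution.py | min_operations_to_equalize_cheese
-- ===== SOURCE A (Python) =====
-- def min_operations_to_equalize_cheese(a: int, b: int) -> int:
--     # Initialize counters for each divisor
--     x, y, z = 0, 0, 0
--     X, Y, Z = 0, 0, 0
--
--     # Count the number of operations needed to reduce 'a'
--     while a % 2 == 0:
--         a //= 2
--         x += 1
--     while a % 3 == 0:
--         a //= 3
--         y += 1
--     while a % 5 == 0:
--         a //= 5
--         z += 1
--
--     # Count the number of operations needed to reduce 'b'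
--     while b % 2 == 0:
--         b //= 2
--         X += 1
--     while b % 3 == 0:
--         b //= 3
--         Y += 1
--     while b % 5 == 0:
--         b //= 5
--         Z += 1
--
--     # If the reduced values of 'a' and 'b' are not equal, it's impossible
--     if a != b:
--         return -1
--
--     # Calculate the minimum number of operations needed
--     return max(X, x) - min(X, x) + max(y, Y) - min(y, Y) + max(z, Z) - min(z, Z)
-- ===== SOURCE B (Python) =====
-- def min_operations_to_equalize_cheese(a: int, b: int) -> int:
--     # Work on the pair jointly: while the numbers differ, find a prime in
--     # (2, 3, 5) dividing either; divide it out of both at once for free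
--     # (a shared factor never needs an operation) or out of the one that has
--     # it for one operation; if none divides, the numbers can never meet.
--     ops = 0
--     while a != b:
--         for p in (2, 3, 5):
--             if a % p == 0 and b % p == 0:
--                 a //= p
--                 b //= p
--                 break
--             if a % p == 0:
--                 a //= p
--                 ops += 1
--                 break
--             if b % p == 0:
--                 b //= p
--                 ops += 1
--                 break
--         else:
--             return -1
--     return ops
-- ===== Notes on version B (the rewrite author's own statement) =====
-- stated objective: alternative
-- what changed: Instead of fully factoring each number separately into 2/3/5 exponents and comparing them, B runs one joint loop on the pair: while a != b it divides a shared factor out of both at no cost or an unshared factor out of one number for one operation, returning -1 when no factor of 2/3/5 divides either and the numbers still differ.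
import Mathlib
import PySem

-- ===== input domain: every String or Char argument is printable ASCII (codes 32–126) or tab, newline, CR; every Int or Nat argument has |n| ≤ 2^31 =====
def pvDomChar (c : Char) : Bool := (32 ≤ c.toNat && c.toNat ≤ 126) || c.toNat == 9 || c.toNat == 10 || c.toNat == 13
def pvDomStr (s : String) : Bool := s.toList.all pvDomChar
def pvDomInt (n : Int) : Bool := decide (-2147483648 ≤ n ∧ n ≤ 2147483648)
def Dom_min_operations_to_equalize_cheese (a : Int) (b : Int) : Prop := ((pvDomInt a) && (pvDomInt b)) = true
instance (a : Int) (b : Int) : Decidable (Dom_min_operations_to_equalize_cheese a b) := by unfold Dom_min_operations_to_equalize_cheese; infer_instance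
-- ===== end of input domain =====

-- B replaces A's per-number exponent extraction (six while-loops plus max-min sums) by one
-- joint loop on the pair that cancels shared 2/3/5 factors for free and counts unshared
-- divisions, returning -1 when the numbers differ and no factor remains (objective: alternative).


-- termination helper, cited by name in both ports' decreasing_by
theorem pv_fd_lt {p n : Int} (hp : 2 ≤ p) (hn : n ≠ 0) (hm : PySem.Int.mod n p = 0) :
    (PySem.Int.floordiv n p).natAbs < n.natAbs := by
  obtain ⟨k, hk⟩ := (PySem.Int.mod_eq_zero_iff_dvd n p).mp hm
  have hk0 : k ≠ 0 := by rintro rfl; simp at hk; omega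
  have hdq : PySem.Int.floordiv n p = k := by
    rw [PySem.Int.floordiv_eq_ediv_of_pos (by omega), hk, Int.mul_ediv_cancel_left _ (by omega)]
  rw [hdq, hk, Int.natAbs_mul]
  have h2 : 2 ≤ p.natAbs := by omega
  nlinarith [Int.natAbs_pos.mpr hk0]

-- ===== PORT A =====
-- one Python 'while n % p == 0: n //= p; c += 1' loop, returning (residual, count);
-- the 'n ≠ 0' guard only makes the recursion total (the Python loops forever at n = 0)
def pvPeel (p : Int) (n : Int) : Int × Int :=
  if h : 2 ≤ p ∧ n ≠ 0 ∧ PySem.Int.mod n p = 0 then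
    let r := pvPeel p (PySem.Int.floordiv n p)
    (r.1, r.2 + 1)
  else (n, 0)
termination_by n.natAbs
decreasing_by exact pv_fd_lt h.1 h.2.1 h.2.2

def min_operations_to_equalize_cheese (a : Int) (b : Int) : Int :=
  -- while a % 2 == 0 … ; while a % 3 == 0 … ; while a % 5 == 0 …
  let pa2 := pvPeel 2 a
  let pa3 := pvPeel 3 pa2.1
  let pa5 := pvPeel 5 pa3.1
  -- the same three loops for b
  let pb2 := pvPeel 2 b
  let pb3 := pvPeel 3 pb2.1
  let pb5 := pvPeel 5 pb3.1
  if pa5.1 ≠ pb5.1 then -1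
  else
    max pb2.2 pa2.2 - min pb2.2 pa2.2 + (max pa3.2 pb3.2 - min pa3.2 pb3.2)
      + (max pa5.2 pb5.2 - min pa5.2 pb5.2)

-- ===== PORT B =====
-- the joint 'while a != b: for p in (2,3,5): …' loop of Source B, ops the accumulator; the Nat
-- fuel only makes the recursion total (a.natAbs + b.natAbs + 1 steps always suffice, and the
-- Python loops forever exactly where the fuel would run out, at a = 0 or b = 0 — outside Pre_)
def pvLoop (fuel : Nat) (a : Int) (b : Int) (ops : Int) : Int :=
  match fuel with
  | 0 => -1
  | fuel + 1 =>
    if a = b then ops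
    else if PySem.Int.mod a 2 = 0 ∧ PySem.Int.mod b 2 = 0 then
      pvLoop fuel (PySem.Int.floordiv a 2) (PySem.Int.floordiv b 2) ops
    else if PySem.Int.mod a 2 = 0 then pvLoop fuel (PySem.Int.floordiv a 2) b (ops + 1)
    else if PySem.Int.mod b 2 = 0 then pvLoop fuel a (PySem.Int.floordiv b 2) (ops + 1)
    else if PySem.Int.mod a 3 = 0 ∧ PySem.Int.mod b 3 = 0 then
      pvLoop fuel (PySem.Int.floordiv a 3) (PySem.Int.floordiv b 3) ops
    else if PySem.Int.mod a 3 = 0 then pvLoop fuel (PySem.Int.floordiv a 3) b (ops + 1)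
    else if PySem.Int.mod b 3 = 0 then pvLoop fuel a (PySem.Int.floordiv b 3) (ops + 1)
    else if PySem.Int.mod a 5 = 0 ∧ PySem.Int.mod b 5 = 0 then
      pvLoop fuel (PySem.Int.floordiv a 5) (PySem.Int.floordiv b 5) ops
    else if PySem.Int.mod a 5 = 0 then pvLoop fuel (PySem.Int.floordiv a 5) b (ops + 1)
    else if PySem.Int.mod b 5 = 0 then pvLoop fuel a (PySem.Int.floordiv b 5) (ops + 1)
    else -1

def min_operations_to_equalize_cheese_alt (a : Int) (b : Int) : Int :=
  pvLoop (a.natAbs + b.natAbs + 1) a b 0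

-- ===== PRECONDITION & SPEC =====
-- Pre_ excludes a = 0 and b = 0, on which both Pythons loop forever (0 % 2 == 0 and 0 // 2 == 0)
def Pre_min_operations_to_equalize_cheese (a : Int) (b : Int) : Prop := a ≠ 0 ∧ b ≠ 0
instance (a : Int) (b : Int) : Decidable (Pre_min_operations_to_equalize_cheese a b) := by unfold Pre_min_operations_to_equalize_cheese; infer_instance
def pvWitness_min_operations_to_equalize_cheese : Int × Int := (2, 3)

def Spec_min_operations_to_equalize_cheese (a : Int) (b : Int) (out : Int) : Prop := out = min_operations_to_equalize_cheese_alt a b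
instance (a : Int) (b : Int) (out : Int) : Decidable (Spec_min_operations_to_equalize_cheese a b out) := by unfold Spec_min_operations_to_equalize_cheese; infer_instance

-- ===== CLAIM (what is proved, stated in full; the proofs are below) =====
def Claim_equal_min_operations_to_equalize_cheese : Prop := ∀ (a : Int) (b : Int), Dom_min_operations_to_equalize_cheese a b → Pre_min_operations_to_equalize_cheese a b → Spec_min_operations_to_equalize_cheese a b (min_operations_to_equalize_cheese a b)


-- ===== LEMMAS AND PROOFS =====

-- the exponent/residual readings of A's peel chain
def pvR (n : Int) : Int := (pvPeel 5 (pvPeel 3 (pvPeel 2 n).1).1).1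
def pvC2 (n : Int) : Int := (pvPeel 2 n).2
def pvC3 (n : Int) : Int := (pvPeel 3 (pvPeel 2 n).1).2
def pvC5 (n : Int) : Int := (pvPeel 5 (pvPeel 3 (pvPeel 2 n).1).1).2

theorem peel_stop {p n : Int} (h : PySem.Int.mod n p ≠ 0) : pvPeel p n = (n, 0) := by
  rw [pvPeel, dif_neg (by tauto)]

theorem peel_step {p n : Int} (hp : 2 ≤ p) (hn : n ≠ 0) (hm : PySem.Int.mod n p = 0) :
    pvPeel p n = ((pvPeel p (PySem.Int.floordiv n p)).1, (pvPeel p (PySem.Int.floordiv n p)).2 + 1) := by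
  rw [pvPeel, dif_pos ⟨hp, hn, hm⟩]

theorem pv_fd_factor {p n : Int} (hp : 2 ≤ p) (hm : PySem.Int.mod n p = 0) :
    n = p * PySem.Int.floordiv n p := by
  obtain ⟨k, hk⟩ := (PySem.Int.mod_eq_zero_iff_dvd n p).mp hm
  have : PySem.Int.floordiv n p = k := by
    rw [PySem.Int.floordiv_eq_ediv_of_pos (by omega), hk, Int.mul_ediv_cancel_left _ (by omega)]
  rw [this]; exact hk

theorem pv_fd_ne {p n : Int} (hp : 2 ≤ p) (hn : n ≠ 0) (hm : PySem.Int.mod n p = 0) :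
    PySem.Int.floordiv n p ≠ 0 := by
  intro h0
  exact hn (by rw [pv_fd_factor hp hm, h0, mul_zero])

theorem peel_cnt_nonneg (p n : Int) : 0 ≤ (pvPeel p n).2 := by
  rw [pvPeel]
  split
  case isTrue h =>
    have ih := peel_cnt_nonneg p (PySem.Int.floordiv n p)
    dsimp only
    omega
  case isFalse h => simp
termination_by n.natAbs
decreasing_by
  rename_i h
  exact pv_fd_lt h.1 h.2.1 h.2.2

theorem peel_cnt_pos {p n : Int} (hp : 2 ≤ p) (hn : n ≠ 0) (hm : PySem.Int.mod n p = 0) :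
    1 ≤ (pvPeel p n).2 := by
  rw [peel_step hp hn hm]
  have := peel_cnt_nonneg p (PySem.Int.floordiv n p)
  dsimp only
  omega

theorem pv_fd_nmod {p q n : Int} (hp : 2 ≤ p) (hm : PySem.Int.mod n p = 0)
    (hq : PySem.Int.mod n q ≠ 0) : PySem.Int.mod (PySem.Int.floordiv n p) q ≠ 0 := by
  intro hc
  apply hq
  rw [PySem.Int.mod_eq_zero_iff_dvd] at hc ⊢
  exact (pv_fd_factor hp hm) ▸ hc.mul_left p

-- step lemmas: dividing out one prime shifts exactly its own exponent and leaves the rest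
theorem step2 {a : Int} (hn : a ≠ 0) (hm : PySem.Int.mod a 2 = 0) :
    pvC2 (PySem.Int.floordiv a 2) = pvC2 a - 1 ∧ pvC3 (PySem.Int.floordiv a 2) = pvC3 a ∧
    pvC5 (PySem.Int.floordiv a 2) = pvC5 a ∧ pvR (PySem.Int.floordiv a 2) = pvR a := by
  have h := peel_step (by norm_num) hn hm
  have hfst : (pvPeel 2 a).1 = (pvPeel 2 (PySem.Int.floordiv a 2)).1 := by rw [h]
  have hsnd : (pvPeel 2 a).2 = (pvPeel 2 (PySem.Int.floordiv a 2)).2 + 1 := by rw [h]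
  refine ⟨?_, ?_, ?_, ?_⟩ <;> (simp only [pvC2, pvC3, pvC5, pvR, hfst, hsnd]; try omega)

theorem step3 {a : Int} (hn : a ≠ 0) (h2 : PySem.Int.mod a 2 ≠ 0) (hm : PySem.Int.mod a 3 = 0) :
    pvC2 (PySem.Int.floordiv a 3) = pvC2 a ∧ pvC3 (PySem.Int.floordiv a 3) = pvC3 a - 1 ∧
    pvC5 (PySem.Int.floordiv a 3) = pvC5 a ∧ pvR (PySem.Int.floordiv a 3) = pvR a := by
  have h2' : PySem.Int.mod (PySem.Int.floordiv a 3) 2 ≠ 0 := pv_fd_nmod (by norm_num) hm h2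
  have e1 : (pvPeel 2 a).1 = a := by rw [peel_stop h2]
  have e1' : (pvPeel 2 a).2 = 0 := by rw [peel_stop h2]
  have e2 : (pvPeel 2 (PySem.Int.floordiv a 3)).1 = PySem.Int.floordiv a 3 := by rw [peel_stop h2']
  have e2' : (pvPeel 2 (PySem.Int.floordiv a 3)).2 = 0 := by rw [peel_stop h2']
  have h := peel_step (p := 3) (by norm_num) hn hm
  have hfst : (pvPeel 3 a).1 = (pvPeel 3 (PySem.Int.floordiv a 3)).1 := by rw [h]
  have hsnd : (pvPeel 3 a).2 = (pvPeel 3 (PySem.Int.floordiv a 3)).2 + 1 := by rw [h]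
  refine ⟨?_, ?_, ?_, ?_⟩ <;>
    (simp only [pvC2, pvC3, pvC5, pvR, e1, e1', e2, e2', hfst, hsnd]; try omega)

theorem step5 {a : Int} (hn : a ≠ 0) (h2 : PySem.Int.mod a 2 ≠ 0) (h3 : PySem.Int.mod a 3 ≠ 0)
    (hm : PySem.Int.mod a 5 = 0) :
    pvC2 (PySem.Int.floordiv a 5) = pvC2 a ∧ pvC3 (PySem.Int.floordiv a 5) = pvC3 a ∧
    pvC5 (PySem.Int.floordiv a 5) = pvC5 a - 1 ∧ pvR (PySem.Int.floordiv a 5) = pvR a := by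
  have h2' : PySem.Int.mod (PySem.Int.floordiv a 5) 2 ≠ 0 := pv_fd_nmod (by norm_num) hm h2
  have h3' : PySem.Int.mod (PySem.Int.floordiv a 5) 3 ≠ 0 := pv_fd_nmod (by norm_num) hm h3
  have e1 : (pvPeel 2 a).1 = a := by rw [peel_stop h2]
  have e1' : (pvPeel 2 a).2 = 0 := by rw [peel_stop h2]
  have e2 : (pvPeel 2 (PySem.Int.floordiv a 5)).1 = PySem.Int.floordiv a 5 := by rw [peel_stop h2']
  have e2' : (pvPeel 2 (PySem.Int.floordiv a 5)).2 = 0 := by rw [peel_stop h2']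
  have f1 : (pvPeel 3 a).1 = a := by rw [peel_stop h3]
  have f1' : (pvPeel 3 a).2 = 0 := by rw [peel_stop h3]
  have f2 : (pvPeel 3 (PySem.Int.floordiv a 5)).1 = PySem.Int.floordiv a 5 := by rw [peel_stop h3']
  have f2' : (pvPeel 3 (PySem.Int.floordiv a 5)).2 = 0 := by rw [peel_stop h3']
  have h := peel_step (p := 5) (by norm_num) hn hm
  have hfst : (pvPeel 5 a).1 = (pvPeel 5 (PySem.Int.floordiv a 5)).1 := by rw [h]
  have hsnd : (pvPeel 5 a).2 = (pvPeel 5 (PySem.Int.floordiv a 5)).2 + 1 := by rw [h]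
  refine ⟨?_, ?_, ?_, ?_⟩ <;>
    (simp only [pvC2, pvC3, pvC5, pvR, e1, e1', e2, e2', f1, f1', f2, f2', hfst, hsnd]; try omega)

theorem pvC2_zero {a : Int} (h2 : PySem.Int.mod a 2 ≠ 0) : pvC2 a = 0 := by
  simp only [pvC2, peel_stop h2]

theorem pvC2_pos {a : Int} (hn : a ≠ 0) (hm : PySem.Int.mod a 2 = 0) : 1 ≤ pvC2 a :=
  peel_cnt_pos (by norm_num) hn hm

theorem pvC3_zero {a : Int} (h2 : PySem.Int.mod a 2 ≠ 0) (h3 : PySem.Int.mod a 3 ≠ 0) :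
    pvC3 a = 0 := by
  simp only [pvC3, peel_stop h2, peel_stop h3]

theorem pvC3_pos {a : Int} (hn : a ≠ 0) (h2 : PySem.Int.mod a 2 ≠ 0)
    (hm : PySem.Int.mod a 3 = 0) : 1 ≤ pvC3 a := by
  have e : pvC3 a = (pvPeel 3 a).2 := by simp only [pvC3, peel_stop h2]
  rw [e]; exact peel_cnt_pos (by norm_num) hn hm

theorem pvC5_zero {a : Int} (h2 : PySem.Int.mod a 2 ≠ 0) (h3 : PySem.Int.mod a 3 ≠ 0)
    (h5 : PySem.Int.mod a 5 ≠ 0) : pvC5 a = 0 := by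
  simp only [pvC5, peel_stop h2, peel_stop h3, peel_stop h5]

theorem pvC5_pos {a : Int} (hn : a ≠ 0) (h2 : PySem.Int.mod a 2 ≠ 0)
    (h3 : PySem.Int.mod a 3 ≠ 0) (hm : PySem.Int.mod a 5 = 0) : 1 ≤ pvC5 a := by
  have e : pvC5 a = (pvPeel 5 a).2 := by simp only [pvC5, peel_stop h2, peel_stop h3]
  rw [e]; exact peel_cnt_pos (by norm_num) hn hm

theorem pvR_triv {a : Int} (h2 : PySem.Int.mod a 2 ≠ 0) (h3 : PySem.Int.mod a 3 ≠ 0)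
    (h5 : PySem.Int.mod a 5 ≠ 0) : pvR a = a := by
  simp only [pvR, peel_stop h2, peel_stop h3, peel_stop h5]

-- the joint loop computes A's answer: residuals equal → ops + Σ |exponent differences|, else -1
theorem pvLoop_eq (fuel : Nat) : ∀ (a b ops : Int), a ≠ 0 → b ≠ 0 →
    a.natAbs + b.natAbs < fuel →
    pvLoop fuel a b ops =
      if pvR a = pvR b then
        ops + (|pvC2 a - pvC2 b| + |pvC3 a - pvC3 b| + |pvC5 a - pvC5 b|)
      else -1 := by
  induction fuel with
  | zero => intro a b ops _ _ hf; omega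
  | succ fuel ih =>
    intro a b ops ha hb hf
    rw [pvLoop]
    set R := (if pvR a = pvR b then
        ops + (|pvC2 a - pvC2 b| + |pvC3 a - pvC3 b| + |pvC5 a - pvC5 b|)
      else -1) with hR
    split_ifs with hEq h2 ha2 hb2 h3 ha3 hb3 h5 ha5 hb5
    · -- a = b
      rw [hR, hEq, if_pos rfl]
      simp
    · -- shared factor 2
      have da := pv_fd_lt (p := 2) (by norm_num) ha h2.1
      have db := pv_fd_lt (p := 2) (by norm_num) hb h2.2
      rw [ih _ _ _ (pv_fd_ne (by norm_num) ha h2.1) (pv_fd_ne (by norm_num) hb h2.2) (by omega)]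
      obtain ⟨s1, s2, s3, s4⟩ := step2 ha h2.1
      obtain ⟨t1, t2, t3, t4⟩ := step2 hb h2.2
      rw [s1, s2, s3, s4, t1, t2, t3, t4, hR]
      have e : pvC2 a - 1 - (pvC2 b - 1) = pvC2 a - pvC2 b := by ring
      rw [e]
    · -- factor 2 in a only
      have hb2' : PySem.Int.mod b 2 ≠ 0 := fun hc => h2 ⟨ha2, hc⟩
      have da := pv_fd_lt (p := 2) (by norm_num) ha ha2
      rw [ih _ _ _ (pv_fd_ne (by norm_num) ha ha2) hb (by omega)]
      obtain ⟨s1, s2, s3, s4⟩ := step2 ha ha2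
      rw [s1, s2, s3, s4, hR]
      split_ifs with h
      · have h1 := pvC2_pos ha ha2
        rw [pvC2_zero hb2']
        have e1 : |pvC2 a - 1 - 0| = pvC2 a - 1 := by rw [sub_zero]; exact abs_of_nonneg (by omega)
        have e2 : |pvC2 a - 0| = pvC2 a := by rw [sub_zero]; exact abs_of_nonneg (by omega)
        rw [e1, e2]; ring
      · rfl
    · -- factor 2 in b only
      have db := pv_fd_lt (p := 2) (by norm_num) hb hb2
      rw [ih _ _ _ ha (pv_fd_ne (by norm_num) hb hb2) (by omega)]
      obtain ⟨t1, t2, t3, t4⟩ := step2 hb hb2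
      rw [t1, t2, t3, t4, hR]
      split_ifs with h
      · have h1 := pvC2_pos hb hb2
        rw [pvC2_zero ha2]
        have e1 : |0 - (pvC2 b - 1)| = pvC2 b - 1 := by
          rw [zero_sub, abs_neg]; exact abs_of_nonneg (by omega)
        have e2 : |0 - pvC2 b| = pvC2 b := by rw [zero_sub, abs_neg]; exact abs_of_nonneg (by omega)
        rw [e1, e2]; ring
      · rfl
    · -- shared factor 3
      have da := pv_fd_lt (p := 3) (by norm_num) ha h3.1
      have db := pv_fd_lt (p := 3) (by norm_num) hb h3.2
      rw [ih _ _ _ (pv_fd_ne (by norm_num) ha h3.1) (pv_fd_ne (by norm_num) hb h3.2) (by omega)]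
      obtain ⟨s1, s2, s3, s4⟩ := step3 ha ha2 h3.1
      obtain ⟨t1, t2, t3, t4⟩ := step3 hb hb2 h3.2
      rw [s1, s2, s3, s4, t1, t2, t3, t4, hR]
      have e : pvC3 a - 1 - (pvC3 b - 1) = pvC3 a - pvC3 b := by ring
      rw [e]
    · -- factor 3 in a only
      have hb3' : PySem.Int.mod b 3 ≠ 0 := fun hc => h3 ⟨ha3, hc⟩
      have da := pv_fd_lt (p := 3) (by norm_num) ha ha3
      rw [ih _ _ _ (pv_fd_ne (by norm_num) ha ha3) hb (by omega)]
      obtain ⟨s1, s2, s3, s4⟩ := step3 ha ha2 ha3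
      rw [s1, s2, s3, s4, hR]
      split_ifs with h
      · have h1 := pvC3_pos ha ha2 ha3
        rw [pvC3_zero hb2 hb3']
        have e1 : |pvC3 a - 1 - 0| = pvC3 a - 1 := by rw [sub_zero]; exact abs_of_nonneg (by omega)
        have e2 : |pvC3 a - 0| = pvC3 a := by rw [sub_zero]; exact abs_of_nonneg (by omega)
        rw [e1, e2]; ring
      · rfl
    · -- factor 3 in b only
      have db := pv_fd_lt (p := 3) (by norm_num) hb hb3
      rw [ih _ _ _ ha (pv_fd_ne (by norm_num) hb hb3) (by omega)]
      obtain ⟨t1, t2, t3, t4⟩ := step3 hb hb2 hb3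
      rw [t1, t2, t3, t4, hR]
      split_ifs with h
      · have h1 := pvC3_pos hb hb2 hb3
        rw [pvC3_zero ha2 ha3]
        have e1 : |0 - (pvC3 b - 1)| = pvC3 b - 1 := by
          rw [zero_sub, abs_neg]; exact abs_of_nonneg (by omega)
        have e2 : |0 - pvC3 b| = pvC3 b := by rw [zero_sub, abs_neg]; exact abs_of_nonneg (by omega)
        rw [e1, e2]; ring
      · rfl
    · -- shared factor 5
      have da := pv_fd_lt (p := 5) (by norm_num) ha h5.1
      have db := pv_fd_lt (p := 5) (by norm_num) hb h5.2
      rw [ih _ _ _ (pv_fd_ne (by norm_num) ha h5.1) (pv_fd_ne (by norm_num) hb h5.2) (by omega)]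
      obtain ⟨s1, s2, s3, s4⟩ := step5 ha ha2 ha3 h5.1
      obtain ⟨t1, t2, t3, t4⟩ := step5 hb hb2 hb3 h5.2
      rw [s1, s2, s3, s4, t1, t2, t3, t4, hR]
      have e : pvC5 a - 1 - (pvC5 b - 1) = pvC5 a - pvC5 b := by ring
      rw [e]
    · -- factor 5 in a only
      have hb5' : PySem.Int.mod b 5 ≠ 0 := fun hc => h5 ⟨ha5, hc⟩
      have da := pv_fd_lt (p := 5) (by norm_num) ha ha5
      rw [ih _ _ _ (pv_fd_ne (by norm_num) ha ha5) hb (by omega)]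
      obtain ⟨s1, s2, s3, s4⟩ := step5 ha ha2 ha3 ha5
      rw [s1, s2, s3, s4, hR]
      split_ifs with h
      · have h1 := pvC5_pos ha ha2 ha3 ha5
        rw [pvC5_zero hb2 hb3 hb5']
        have e1 : |pvC5 a - 1 - 0| = pvC5 a - 1 := by rw [sub_zero]; exact abs_of_nonneg (by omega)
        have e2 : |pvC5 a - 0| = pvC5 a := by rw [sub_zero]; exact abs_of_nonneg (by omega)
        rw [e1, e2]; ring
      · rfl
    · -- factor 5 in b only
      have db := pv_fd_lt (p := 5) (by norm_num) hb hb5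
      rw [ih _ _ _ ha (pv_fd_ne (by norm_num) hb hb5) (by omega)]
      obtain ⟨t1, t2, t3, t4⟩ := step5 hb hb2 hb3 hb5
      rw [t1, t2, t3, t4, hR]
      split_ifs with h
      · have h1 := pvC5_pos hb hb2 hb3 hb5
        rw [pvC5_zero ha2 ha3 ha5]
        have e1 : |0 - (pvC5 b - 1)| = pvC5 b - 1 := by
          rw [zero_sub, abs_neg]; exact abs_of_nonneg (by omega)
        have e2 : |0 - pvC5 b| = pvC5 b := by rw [zero_sub, abs_neg]; exact abs_of_nonneg (by omega)
        rw [e1, e2]; ring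
      · rfl
    · -- no factor of 2, 3 or 5 divides either and a ≠ b
      rw [hR, pvR_triv ha2 ha3 ha5, pvR_triv hb2 hb3 hb5, if_neg hEq]

-- ===== VERDICT (by name: the statement is the Claim_ definition above) =====
theorem min_operations_to_equalize_cheese_spec : Claim_equal_min_operations_to_equalize_cheese := by
  intro a b _ hpre
  obtain ⟨ha, hb⟩ := hpre
  unfold Spec_min_operations_to_equalize_cheese min_operations_to_equalize_cheese min_operations_to_equalize_cheese_alt
  rw [pvLoop_eq (a.natAbs + b.natAbs + 1) a b 0 ha hb (by omega)]
  show (if pvR a ≠ pvR b then -1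
        else max (pvC2 b) (pvC2 a) - min (pvC2 b) (pvC2 a)
          + (max (pvC3 a) (pvC3 b) - min (pvC3 a) (pvC3 b))
          + (max (pvC5 a) (pvC5 b) - min (pvC5 a) (pvC5 b))) = _
  rw [max_sub_min_eq_abs, max_sub_min_eq_abs, max_sub_min_eq_abs,
    abs_sub_comm (pvC3 b) (pvC3 a), abs_sub_comm (pvC5 b) (pvC5 a)]
  by_cases h : pvR a = pvR b <;> simp [h]
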